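-- pv_equiv track=rewrite | github.com/Tumelo-Jane/Data_analysis_and_visualisation_assignment | analysis/utils.py | _pick_sa_name
-- ===== SOURCE A (Python) =====
-- from typing import Dict, Any, List, Optional
--
-- SA_ALIASES = {
--     "south africa",
--     "south africa, rep.",
--     "south africa (republic of)",
--     "south africa republic",
--     "republic of south africa",
-- }
--
-- def _pick_sa_name(unique_names: List[str]) -> Optional[str]:
--     # Try to find a SA variant in provided names
--     for name in unique_names:
--         if str(name).strip().lower() in SA_ALIASES:
--             return str(name)
--     # try contains
--     for name in unique_names:
--         if "south africa" in str(name).lower():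
--             return str(name)
--     return None
-- ===== SOURCE B (Python) =====
-- from typing import List, Optional
--
-- SA_ALIASES = {
--     "south africa",
--     "south africa, rep.",
--     "south africa (republic of)",
--     "south africa republic",
--     "republic of south africa",
-- }
--
-- def _pick_sa_name(unique_names: List[str]) -> Optional[str]:
--     # Single pass: exact alias match returns immediately; first substring
--     # match is remembered as a fallback returned only if no alias appears.
--     fallback = None
--     for name in unique_names:
--         s = str(name)
--         if s.strip().lower() in SA_ALIASES:
--             return s
--         if fallback is None and "south africa" in s.lower():
--             fallback = s
--     return fallback
-- ===== Notes on version B (the rewrite author's own statement) =====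
-- stated objective: alternative
-- what changed: Replaces A's two sequential scans (alias scan, then substring scan) by a single pass that returns on an exact alias match and maintains a first-substring-match fallback variable.
import Mathlib
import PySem

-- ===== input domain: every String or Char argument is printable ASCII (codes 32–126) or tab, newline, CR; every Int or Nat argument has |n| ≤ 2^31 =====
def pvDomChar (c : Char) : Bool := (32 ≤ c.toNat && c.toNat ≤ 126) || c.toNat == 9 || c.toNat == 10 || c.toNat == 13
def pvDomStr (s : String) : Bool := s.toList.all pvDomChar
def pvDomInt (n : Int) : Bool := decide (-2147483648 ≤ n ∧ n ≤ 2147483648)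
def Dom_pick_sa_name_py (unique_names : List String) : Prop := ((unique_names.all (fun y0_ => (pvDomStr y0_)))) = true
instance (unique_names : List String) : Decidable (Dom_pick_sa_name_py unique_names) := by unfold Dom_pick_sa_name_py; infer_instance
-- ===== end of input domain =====

-- B replaces A's two sequential scans by one pass with a fallback accumulator (objective: alternative, same cost).

-- ===== PORT A =====
def saAliases : List String :=
  ["south africa", "south africa, rep.", "south africa (republic of)",
   "south africa republic", "republic of south africa"]

-- name.strip().lower() in SA_ALIASES
def isAlias (s : String) : Bool := saAliases.contains (PySem.Str.lower (PySem.Str.strip s))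

-- "south africa" in name.lower()
def hasSub (s : String) : Bool := PySem.Str.isIn "south africa" (PySem.Str.lower s)

-- A, first loop: return the first name whose strip().lower() is an alias
def pickAliasScan : List String → Option String
  | [] => none
  | n :: t => if isAlias n then some n else pickAliasScan t

-- A, second loop: return the first name whose lower() contains "south africa"
def pickSubScan : List String → Option String
  | [] => none
  | n :: t => if hasSub n then some n else pickSubScan t

def pick_sa_name_py (unique_names : List String) : Option String :=
  match pickAliasScan unique_names with
  | some s => some s
  | none => pickSubScan unique_names

-- ===== PORT B =====
-- B: single pass carrying the fallback (first substring match so far)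
def pickOnePass : List String → Option String → Option String
  | [], fallback => fallback
  | n :: t, fallback =>
    if isAlias n then some n
    else pickOnePass t (if fallback.isNone && hasSub n then some n else fallback)

def pick_sa_name_py_alt (unique_names : List String) : Option String :=
  pickOnePass unique_names none

-- ===== PRECONDITION & SPEC =====
def Spec_pick_sa_name_py (unique_names : List String) (out : Option String) : Prop := out = pick_sa_name_py_alt unique_names
instance (unique_names : List String) (out : Option String) : Decidable (Spec_pick_sa_name_py unique_names out) := by unfold Spec_pick_sa_name_py; infer_instance

-- ===== CLAIM (what is proved, stated in full; the proofs are below) =====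
def Claim_equal_pick_sa_name_py : Prop := ∀ (unique_names : List String), Dom_pick_sa_name_py unique_names → Spec_pick_sa_name_py unique_names (pick_sa_name_py unique_names)

-- ===== LEMMAS AND PROOFS =====

-- The one-pass loop equals: first alias match, else the carried fallback, else first substring match.
theorem pickOnePass_eq (l : List String) (fb : Option String) :
    pickOnePass l fb =
      match pickAliasScan l with
      | some s => some s
      | none => match fb with
        | some f => some f
        | none => pickSubScan l := by
  induction l generalizing fb with
  | nil => cases fb <;> rfl
  | cons n t ih =>
    by_cases ha : isAlias n = true
    · simp only [pickOnePass, pickAliasScan, if_pos ha]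
    · simp only [pickOnePass, pickAliasScan, pickSubScan, if_neg ha]
      rw [ih]
      cases fb with
      | some f => cases h : pickAliasScan t <;> simp [h]
      | none =>
        cases h : pickAliasScan t with
        | some v => simp [h]
        | none =>
          simp only [h]
          by_cases hs : hasSub n = true <;> simp [hs]

-- ===== VERDICT (by name: the statement is the Claim_ definition above) =====
theorem pick_sa_name_py_spec : Claim_equal_pick_sa_name_py := by
  intro l _
  unfold Spec_pick_sa_name_py pick_sa_name_py pick_sa_name_py_alt
  rw [pickOnePass_eq]
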